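-- pv_equiv track=rewrite | github.com/jasperhyp/questbench | SimpleLogic/make_data_new.py | _all_vars_essential
-- ===== SOURCE A (Python) =====
-- import itertools as it
--
-- def _all_vars_essential(table: dict, q_set: list[str]) -> bool:
--   """Essentiality check on a truth table over consistent rows only."""
--   k = len(q_set)
--   if k <= 1:
--     # For k=0 it's invalid; for k=1 minimality is handled by the context-unknown check.
--     return k == 1
--
--   # For each variable position i, look for a witness pair that flips y
--   for i in range(k):
--     essential = False
--     # iterate over assignments to other k-1 vars
--     for others in it.product([True, False], repeat=k-1):
--       # build the two full tuples differing only at i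
--       t0 = []
--       t1 = []
--       j = 0
--       for p in range(k):
--         if p == i:
--           t0.append(False)
--           t1.append(True)
--         else:
--           t0.append(others[j])
--           t1.append(others[j])
--           j += 1
--       t0 = tuple(t0)
--       t1 = tuple(t1)
--
--       if t0 in table and t1 in table and table[t0] != table[t1]:
--         essential = True
--         break
--
--     if not essential:
--       return False
--
--   return True
-- ===== SOURCE B (Python) =====
-- def _all_vars_essential(table: dict, q_set: list[str]) -> bool:
--     """Essentiality check by scanning the table's actual rows instead of
--     enumerating all 2^(k-1) assignments."""
--     k = len(q_set)
--     if k <= 1: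
--         return k == 1
--
--     def flips(i):
--         # variable i is essential iff some stored row with t[i] == False has
--         # its bit-i partner stored too, with a different output value
--         for t in table:
--             if len(t) == k and not t[i]:
--                 partner = t[:i] + (True,) + t[i + 1:]
--                 if partner in table and table[partner] != table[t]:
--                     return True
--         return False
--
--     return all(flips(i) for i in range(k))
-- ===== Notes on version B (the rewrite author's own statement) =====
-- stated objective: faster
-- what changed: Instead of enumerating all 2^(k-1) assignments of the other variables for each position i, B scans the rows actually stored in the table, flips bit i of each stored row with t[i]==False and looks the partner row up in the dict.
import Mathlib
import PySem

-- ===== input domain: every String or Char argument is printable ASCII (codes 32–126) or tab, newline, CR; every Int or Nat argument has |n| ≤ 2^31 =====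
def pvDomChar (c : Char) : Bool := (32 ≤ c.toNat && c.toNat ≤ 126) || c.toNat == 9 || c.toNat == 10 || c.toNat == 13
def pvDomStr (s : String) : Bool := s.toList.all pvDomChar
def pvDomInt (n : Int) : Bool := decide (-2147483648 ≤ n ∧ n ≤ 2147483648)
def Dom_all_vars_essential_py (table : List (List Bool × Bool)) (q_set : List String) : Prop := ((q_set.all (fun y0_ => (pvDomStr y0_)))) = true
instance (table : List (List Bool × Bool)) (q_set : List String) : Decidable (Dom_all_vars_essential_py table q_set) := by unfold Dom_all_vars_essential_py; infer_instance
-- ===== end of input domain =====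

-- B replaces A's enumeration of all 2^(k-1) assignments per variable by a scan of the
-- rows actually stored in the table (flip bit i of a stored row, look the partner up).

-- ===== PORT A =====
-- itertools.product([True, False], repeat=n), in itertools order
def pvProdTF : Nat → List (List Bool)
  | 0 => [[]]
  | n + 1 => [true, false].flatMap (fun b => (pvProdTF n).map (fun o => b :: o))

-- the inner 'for p in range(k)' loop building (t0, t1); state is (t0, t1, j);
-- others.getD s.2.2 false is Python's others[j] (exact: j < len(others) on every reached step)
def pvBuildA (i : Nat) (others : List Bool) (k : Nat) : List Bool × List Bool :=
  let s := (List.range k).foldl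
    (fun (s : List Bool × List Bool × Nat) p =>
      if p = i then (s.1 ++ [false], s.2.1 ++ [true], s.2.2)
      else (s.1 ++ [others.getD s.2.2 false], s.2.1 ++ [others.getD s.2.2 false], s.2.2 + 1))
    ([], [], 0)
  (s.1, s.2.1)

def all_vars_essential_py (table : List (List Bool × Bool)) (q_set : List String) : Bool :=
  let k := q_set.length
  if k ≤ 1 then decide (k = 1)
  else
    let d : PySem.Dict (List Bool) Bool := PySem.Dict.mk table
    -- 'for i: ... if not essential: return False ... return True' is .all;
    -- 'for others: if cond: essential = True; break' is .any
    (List.range k).all (fun i =>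
      (pvProdTF (k - 1)).any (fun others =>
        let t := pvBuildA i others k
        d.contains t.1 && d.contains t.2 && (d.get? t.1 != d.get? t.2)))

-- ===== PORT B =====
def all_vars_essential_py_alt (table : List (List Bool × Bool)) (q_set : List String) : Bool :=
  let k := q_set.length
  if k ≤ 1 then decide (k = 1)
  else
    let d : PySem.Dict (List Bool) Bool := PySem.Dict.mk table
    -- flips(i): 'for t in table: … return True / return False' is .any over the dict's keys;
    -- t.getD i false is Python's t[i] (exact: guarded by len(t) == k and i < k)
    (List.range k).all (fun i =>
      d.keys.any (fun t =>
        decide (t.length = k) && !(t.getD i false) &&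
          (let partner := t.take i ++ true :: t.drop (i + 1)
           d.contains partner && (d.get? partner != d.get? t))))

-- ===== PRECONDITION & SPEC =====
def Spec_all_vars_essential_py (table : List (List Bool × Bool)) (q_set : List String) (out : Bool) : Prop := out = all_vars_essential_py_alt table q_set
instance (table : List (List Bool × Bool)) (q_set : List String) (out : Bool) : Decidable (Spec_all_vars_essential_py table q_set out) := by unfold Spec_all_vars_essential_py; infer_instance

-- ===== CLAIM (what is proved, stated in full; the proofs are below) =====
def Claim_equal_all_vars_essential_py : Prop := ∀ (table : List (List Bool × Bool)) (q_set : List String), Dom_all_vars_essential_py table q_set → Spec_all_vars_essential_py table q_set (all_vars_essential_py table q_set)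

-- ===== LEMMAS AND PROOFS =====

-- pvProdTF n is exactly the lists of booleans of length n
theorem mem_pvProdTF (n : Nat) (o : List Bool) : o ∈ pvProdTF n ↔ o.length = n := by
  induction n generalizing o with
  | zero => simp [pvProdTF, List.length_eq_zero_iff]
  | succ n ih =>
    cases o with
    | nil => simp [pvProdTF]
    | cons b t => cases b <;> simp [pvProdTF, ih]

-- an i-free segment of the building loop appends others[j], others[j+1], …
theorem pvBuildA_seg (i : Nat) (o : List Bool) (m : Nat) :
    ∀ (a j : Nat) (t0 t1 : List Bool), (∀ p ∈ List.range' a m, p ≠ i) →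
    (List.range' a m).foldl
      (fun (s : List Bool × List Bool × Nat) p =>
        if p = i then (s.1 ++ [false], s.2.1 ++ [true], s.2.2)
        else (s.1 ++ [o.getD s.2.2 false], s.2.1 ++ [o.getD s.2.2 false], s.2.2 + 1))
      (t0, t1, j)
    = (t0 ++ (List.range' j m).map (fun q => o.getD q false),
       t1 ++ (List.range' j m).map (fun q => o.getD q false), j + m) := by
  induction m with
  | zero => intro a j t0 t1 _; simp
  | succ m ih =>
    intro a j t0 t1 hne
    rw [List.range'_succ, List.foldl_cons]
    have ha : a ≠ i := hne a (by simp [List.range'_succ])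
    simp only [ha, if_false]
    rw [ih (a+1) (j+1) _ _ (fun p hp => hne p (by simp [List.range'_succ]; right; simp at hp ⊢; omega))]
    rw [List.range'_succ]
    simp [List.append_assoc]
    omega

theorem map_getD_range' (o : List Bool) (a m : Nat) (h : a + m ≤ o.length) :
    (List.range' a m).map (fun q => o.getD q false) = (o.drop a).take m := by
  apply List.ext_getElem
  · simp; omega
  · intro x h1 h2
    simp only [List.getElem_map, List.getElem_range', List.getElem_take, List.getElem_drop]
    rw [List.getD_eq_getElem?_getD, List.getElem?_eq_getElem (by simp at h1; omega)]
    simp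

theorem pvBuildA_eq (i k : Nat) (o : List Bool) (hi : i < k) (ho : o.length = k - 1) :
    pvBuildA i o k = (o.take i ++ false :: o.drop i, o.take i ++ true :: o.drop i) := by
  unfold pvBuildA
  obtain ⟨m, hm⟩ : ∃ m, k = i + (m + 1) := ⟨k - i - 1, by omega⟩
  have hsplit : List.range k = List.range' 0 i ++ i :: List.range' (i + 1) m := by
    have h1 : List.range' 0 i 1 ++ List.range' (0 + 1 * i) (m + 1) 1 = List.range' 0 (i + (m + 1)) 1 :=
      List.range'_append
    rw [List.range_eq_range', hm, ← h1, List.range'_succ]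
    simp
  rw [hsplit, List.foldl_append, pvBuildA_seg i o i 0 0 [] [] (by intro p hp; simp at hp; omega),
      List.foldl_cons, if_pos rfl]
  dsimp only [List.nil_append]
  rw [Nat.zero_add]
  rw [pvBuildA_seg i o m (i + 1) i _ _ (by intro p hp; simp at hp; omega)]
  have h1 : (List.range' 0 i).map (fun q => o.getD q false) = o.take i := by
    rw [map_getD_range' o 0 i (by omega)]; simp
  have h2 : (List.range' i m).map (fun q => o.getD q false) = o.drop i := by
    rw [map_getD_range' o i m (by omega)]
    apply List.take_of_length_le; simp; omega
  simp only [List.append_assoc, List.singleton_append]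
  rw [h1, h2]

theorem getD_mid (l₁ l₂ : List Bool) (b : Bool) :
    (l₁ ++ b :: l₂).getD l₁.length false = b := by
  simp [List.getD_eq_getElem?_getD]

theorem drop_mid (l₁ l₂ : List Bool) (b : Bool) :
    (l₁ ++ b :: l₂).drop (l₁.length + 1) = l₂ := by
  have h : (l₁ ++ b :: l₂) = (l₁ ++ [b]) ++ l₂ := by simp
  rw [h]
  simpa using (List.drop_left (l := l₁ ++ [b]) (l' := l₂))

theorem take_len (l₁ l₂ : List Bool) (i : Nat) (h : l₁.length = i) :
    (l₁ ++ l₂).take i = l₁ := by subst h; exact List.take_left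

theorem drop_len (l₁ l₂ : List Bool) (i : Nat) (h : l₁.length = i) :
    (l₁ ++ l₂).drop i = l₂ := by subst h; exact List.drop_left

theorem drop_len_cons (l₁ l₂ : List Bool) (b : Bool) (i : Nat) (h : l₁.length = i) :
    (l₁ ++ b :: l₂).drop (i + 1) = l₂ := by subst h; exact drop_mid l₁ l₂ b

theorem getD_len (l₁ l₂ : List Bool) (b : Bool) (i : Nat) (h : l₁.length = i) :
    (l₁ ++ b :: l₂).getD i false = b := by subst h; exact getD_mid l₁ l₂ b

theorem all_congr_mem {α : Type} (l : List α) (p q : α → Bool) (h : ∀ x ∈ l, p x = q x) :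
    l.all p = l.all q := by
  induction l with
  | nil => rfl
  | cons a t ih => simp_all [List.all_cons]

-- the two inner searches agree at every variable position i < k
theorem inner_eq (table : List (List Bool × Bool)) (k i : Nat) (hi : i < k) :
    ((pvProdTF (k - 1)).any (fun others =>
        let t := pvBuildA i others k
        (PySem.Dict.mk table).contains t.1 && (PySem.Dict.mk table).contains t.2 &&
          ((PySem.Dict.mk table).get? t.1 != (PySem.Dict.mk table).get? t.2)))
    = ((PySem.Dict.mk table).keys.any (fun t =>
        decide (t.length = k) && !(t.getD i false) &&
          (let partner := t.take i ++ true :: t.drop (i + 1)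
           (PySem.Dict.mk table).contains partner &&
             ((PySem.Dict.mk table).get? partner != (PySem.Dict.mk table).get? t)))) := by
  rw [Bool.eq_iff_iff]
  simp only [List.any_eq_true, Bool.and_eq_true, bne_iff_ne, decide_eq_true_eq,
    Bool.not_eq_true']
  constructor
  · rintro ⟨o, ho, ⟨hc0, hc1⟩, hne⟩
    have hol : o.length = k - 1 := (mem_pvProdTF _ _).mp ho
    rw [pvBuildA_eq i k o hi hol] at hc0 hc1 hne
    have htake : (o.take i).length = i := by simp; omega
    have hpt : (o.take i ++ (false : Bool) :: o.drop i).take i = o.take i :=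
      take_len _ _ _ htake
    have hpd : (o.take i ++ (false : Bool) :: o.drop i).drop (i + 1) = o.drop i :=
      drop_len_cons _ _ _ _ htake
    refine ⟨o.take i ++ false :: o.drop i,
      (PySem.Dict.contains_iff_mem_keys _ _).mp hc0, ⟨?_, ?_⟩, ?_, ?_⟩
    · simp; omega
    · exact getD_len _ _ _ _ htake
    · rw [hpt, hpd]; exact hc1
    · rw [hpt, hpd]; exact Ne.symm hne
  · rintro ⟨t, htk, ⟨hlen, hgetD⟩, hcp, hnep⟩
    have hit : i < t.length := by omega
    have hti : t[i] = false := by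
      rw [List.getD_eq_getElem?_getD, List.getElem?_eq_getElem hit] at hgetD
      simpa using hgetD
    have htake : (t.take i).length = i := by simp; omega
    have hot : (t.take i ++ t.drop (i + 1)).take i = t.take i :=
      take_len _ _ _ htake
    have hod : (t.take i ++ t.drop (i + 1)).drop i = t.drop (i + 1) :=
      drop_len _ _ _ htake
    have hol : (t.take i ++ t.drop (i + 1)).length = k - 1 := by simp; omega
    have ht0 : (t.take i ++ t.drop (i + 1)).take i ++
        false :: (t.take i ++ t.drop (i + 1)).drop i = t := by
      rw [hot, hod, ← hti, List.getElem_cons_drop hit, List.take_append_drop]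
    refine ⟨t.take i ++ t.drop (i + 1), (mem_pvProdTF _ _).mpr hol, ⟨?_, ?_⟩, ?_⟩
    · rw [pvBuildA_eq i k _ hi hol]
      dsimp only
      rw [ht0]
      exact (PySem.Dict.contains_iff_mem_keys _ _).mpr htk
    · rw [pvBuildA_eq i k _ hi hol]
      dsimp only
      rw [hot, hod]
      exact hcp
    · rw [pvBuildA_eq i k _ hi hol]
      dsimp only
      rw [ht0, hot, hod]
      exact Ne.symm hnep

-- ===== VERDICT (by name: the statement is the Claim_ definition above) =====
theorem all_vars_essential_py_spec : Claim_equal_all_vars_essential_py := by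
  intro table q_set _
  show all_vars_essential_py table q_set = all_vars_essential_py_alt table q_set
  unfold all_vars_essential_py all_vars_essential_py_alt
  by_cases hk : q_set.length ≤ 1
  · simp [hk]
  · rw [if_neg hk, if_neg hk]
    apply all_congr_mem
    intro i hi
    simp only [List.mem_range] at hi
    exact inner_eq table q_set.length i hi
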